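-- pv_equiv track=rewrite | github.com/Devavanshi-Harsh/Reema-Thareja | 5.6.1.18.py | mysplit
-- ===== SOURCE A (Python) =====
-- def mysplit(strng):
--     li=[]
--     strng2=""
--     for i in strng:
--         if i.isalpha():
--             strng2+=i
--         else:
--             li.append(strng2)
--             strng2=""
--             for i in li:
--                 if i=="":
--                     li=[]
--     return li
-- ===== SOURCE B (Python) =====
-- def mysplit(strng):
--     # Pass 1: flush the current alpha run at every non-alpha char (empty runs included).
--     tokens = []
--     run = ""
--     for ch in strng:
--         if ch.isalpha():
--             run += ch
--         else:
--             tokens.append(run)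
--             run = ""
--     # Pass 2: an empty flushed token wipes everything before it, so keep only the
--     # trailing non-empty tokens: walk backwards until an empty token, then reverse.
--     out = []
--     for t in reversed(tokens):
--         if t == "":
--             break
--         out.append(t)
--     out.reverse()
--     return out
-- ===== Notes on version B (the rewrite author's own statement) =====
-- stated objective: alternative
-- what changed: Replaces A's per-flush append-then-rescan-and-clear of the result list (a quadratic inner loop over the list on every non-alpha char) by two passes: tokenize all flushed runs once, then take only the trailing non-empty tokens by a single backwards walk.
import Mathlib
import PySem

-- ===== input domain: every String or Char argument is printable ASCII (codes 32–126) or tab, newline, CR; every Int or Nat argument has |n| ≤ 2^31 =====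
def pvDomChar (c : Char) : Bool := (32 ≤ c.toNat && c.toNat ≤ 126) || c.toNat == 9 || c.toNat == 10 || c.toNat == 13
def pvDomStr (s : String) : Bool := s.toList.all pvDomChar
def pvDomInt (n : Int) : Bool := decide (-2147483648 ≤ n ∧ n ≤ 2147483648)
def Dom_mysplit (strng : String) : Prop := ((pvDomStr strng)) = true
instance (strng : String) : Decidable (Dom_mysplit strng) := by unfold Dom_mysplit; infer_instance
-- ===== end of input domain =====

-- B replaces A's per-flush rescan-and-clear of the result list by one tokenizing pass
-- plus one backwards walk keeping the trailing non-empty tokens (alternative decomposition).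

-- ===== PORT A =====
-- A's loop state: li (result list), strng2 (current alpha run); on a non-alpha char it
-- appends strng2, resets it, and rescans li, rebinding li to [] whenever an element is "".
def mysplitLoopA : List String → String → List Char → List String
  | li, _strng2, [] => li
  | li, strng2, i :: rest =>
    if PySem.Chars.isalpha i then
      mysplitLoopA li (strng2.push i) rest
    else
      let li1 := li ++ [strng2]
      -- inner 'for i in li: if i=="": li=[]' iterates the appended list, rebinding li
      let li2 := li1.foldl (fun acc j => if j = "" then [] else acc) li1
      mysplitLoopA li2 "" rest

def mysplit (strng : String) : List String := mysplitLoopA [] "" strng.toList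

-- ===== PORT B =====
-- Pass 1 of Source B: flush the run at every non-alpha char, collecting all tokens.
def mysplitTokens : List String → String → List Char → List String
  | tokens, _run, [] => tokens
  | tokens, run, ch :: rest =>
    if PySem.Chars.isalpha ch then
      mysplitTokens tokens (run.push ch) rest
    else
      mysplitTokens (tokens ++ [run]) "" rest

-- Pass 2 of Source B: walk reversed(tokens), stop at the first empty token, reverse back.
def mysplitTail (tokens : List String) : List String :=
  ((tokens.reverse).takeWhile (fun t => ¬ t = "")).reverse

def mysplit_alt (strng : String) : List String :=
  mysplitTail (mysplitTokens [] "" strng.toList)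

-- ===== PRECONDITION & SPEC =====
def Spec_mysplit (strng : String) (out : List String) : Prop := out = mysplit_alt strng
instance (strng : String) (out : List String) : Decidable (Spec_mysplit strng out) := by unfold Spec_mysplit; infer_instance

-- ===== CLAIM (what is proved, stated in full; the proofs are below) =====
def Claim_equal_mysplit : Prop := ∀ (strng : String), Dom_mysplit strng → Spec_mysplit strng (mysplit strng)

-- ===== LEMMAS AND PROOFS =====

-- A's inner rescan loop: the accumulator becomes [] iff some element is "".
theorem foldl_reset (l : List String) (init : List String) :
    l.foldl (fun acc j => if j = "" then [] else acc) init
      = if "" ∈ l then [] else init := by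
  induction l generalizing init with
  | nil => simp
  | cons a l ih =>
    by_cases h : a = ""
    · subst h
      simp [List.foldl, ih]
    · simp [List.foldl, h, ih]

-- B's tokenizer is an append homomorphism in its accumulator.
theorem mysplitTokens_append (cs : List Char) (tokens : List String) (run : String) :
    mysplitTokens tokens run cs = tokens ++ mysplitTokens [] run cs := by
  induction cs generalizing tokens run with
  | nil => simp [mysplitTokens]
  | cons c cs ih =>
    by_cases h : PySem.Chars.isalpha c
    · simp only [mysplitTokens, h, ite_true]
      exact ih tokens (run.push c)
    · simp only [mysplitTokens, h, Bool.false_eq_true, ite_false]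
      rw [ih (tokens ++ [run]), ih ([] ++ [run])]
      simp

theorem takeWhile_append_stop {α : Type} (p : α → Bool) (x : α) (hx : p x = false)
    (as bs : List α) :
    (as ++ x :: bs).takeWhile p = as.takeWhile p := by
  induction as with
  | nil => simp [List.takeWhile, hx]
  | cons a as ih =>
    by_cases h : p a
    · simp [List.takeWhile, h, ih]
    · simp [List.takeWhile, h]

-- A prefix ending in "" does not affect B's second pass.
theorem mysplitTail_wipe (xs rest : List String) :
    mysplitTail ((xs ++ [""]) ++ rest) = mysplitTail rest := by
  unfold mysplitTail
  have : ((xs ++ [""]) ++ rest).reverse = rest.reverse ++ "" :: xs.reverse := by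
    simp
  rw [this, takeWhile_append_stop (fun t => ¬ t = "") "" (by simp)]

-- On a list with no empty element, B's second pass is the identity.
theorem mysplitTail_clean (l : List String) (h : "" ∉ l) : mysplitTail l = l := by
  unfold mysplitTail
  rw [List.takeWhile_eq_self_iff.mpr ?_, List.reverse_reverse]
  intro a ha
  simp only [decide_eq_true_eq]
  intro he
  exact h (by simpa [he] using (List.mem_reverse.mp ha))

-- Main invariant: from any "clean" result list, A's loop computes B's second pass
-- applied to B's token list started from the same state.
theorem main_inv (cs : List Char) (li : List String) (s2 : String) (h : "" ∉ li) :
    mysplitLoopA li s2 cs = mysplitTail (mysplitTokens li s2 cs) := by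
  induction cs generalizing li s2 with
  | nil => simp [mysplitLoopA, mysplitTokens, mysplitTail_clean li h]
  | cons c cs ih =>
    by_cases hc : PySem.Chars.isalpha c
    · simp only [mysplitLoopA, mysplitTokens, hc, if_pos]
      exact ih li (s2.push c) h
    · simp only [mysplitLoopA, mysplitTokens, hc, Bool.false_eq_true, ite_false]
      rw [foldl_reset]
      have hmem : ("" ∈ li ++ [s2]) ↔ s2 = "" := by
        simp [h, eq_comm]
      by_cases hs : s2 = ""
      · rw [if_pos (hmem.mpr hs), ih [] "" (by simp)]
        subst hs
        rw [mysplitTokens_append cs (li ++ [""]) "",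
            mysplitTokens_append cs [] ""]
        exact (mysplitTail_wipe li _).symm
      · rw [if_neg (fun hIn => hs (hmem.mp hIn))]
        exact ih (li ++ [s2]) "" (by simp [h, hs])

-- ===== VERDICT (by name: the statement is the Claim_ definition above) =====
theorem mysplit_spec : Claim_equal_mysplit := by
  intro strng _
  unfold Spec_mysplit mysplit mysplit_alt
  exact main_inv strng.toList [] "" (by simp)
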